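-- pv_equiv track=rewrite | github.com/BLYakub/Python_Work_11_grade | Arranged-Num/ArrangedNum.py | arrange_string
-- ===== SOURCE A (Python) =====
-- def arrange_string(str1, char1):
--     new_string = ""
--     add_char = False
--     if str1 == "":  # If the 'str1'('arranged_chars') is empty it just adds 'char1' and returns the string
--         new_string += char1
--         return new_string
--
--     for char2 in str1:  # A loop that goes for the amount of chars in 'str1'
--         if char1 <= char2 and not add_char:  # If 'char1' is smaller than 'char2' it adds 'char1' before 'char2'
--             new_string += (char1 + char2)
--             add_char = True
--         else:  # Else it just adds 'char2'
--             new_string += char2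
--
--     if not add_char:  # If 'add_char' == False it adds 'char1' to the end of 'new_string'
--         new_string += char1
--     return new_string
-- ===== SOURCE B (Python) =====
-- def arrange_string(str1, char1):
--     i = next((idx for idx, c in enumerate(str1) if char1 <= c), len(str1))
--     return str1[:i] + char1 + str1[i:]
-- ===== Notes on version B (the rewrite author's own statement) =====
-- stated objective: simpler
-- what changed: Replaces the accumulator loop with a boolean insertion flag and a separate empty-string branch by a first-match index scan followed by a single slice-splice, with no flag and no special cases.
import Mathlib
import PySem

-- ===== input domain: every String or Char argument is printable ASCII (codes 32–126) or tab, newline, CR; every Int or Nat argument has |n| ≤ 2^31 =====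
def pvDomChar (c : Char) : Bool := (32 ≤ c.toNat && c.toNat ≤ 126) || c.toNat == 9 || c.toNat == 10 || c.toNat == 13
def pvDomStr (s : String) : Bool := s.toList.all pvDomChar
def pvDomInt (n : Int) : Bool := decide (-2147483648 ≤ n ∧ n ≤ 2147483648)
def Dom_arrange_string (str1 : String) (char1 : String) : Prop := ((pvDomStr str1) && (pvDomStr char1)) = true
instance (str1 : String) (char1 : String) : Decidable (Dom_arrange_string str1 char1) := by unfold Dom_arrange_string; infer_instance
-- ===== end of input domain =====

-- B replaces A's flag-carrying accumulator loop and separate empty-string branch by one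
-- first-match index scan plus a single slice-splice (objective: simpler).

-- ===== PORT A =====
-- A's loop over str1: state = (new_string so far, add_char flag); Python's `char1 <= char2`
-- is code-point lexicographic ≤ on the string vs the one-char string (PySem: List Char ≤).
def arrangeGoA (c1 : List Char) : List Char → List Char → Bool → List Char
  | [], acc, addChar => if !addChar then acc ++ c1 else acc
  | c2 :: rest, acc, addChar =>
      if decide (c1 ≤ [c2]) && !addChar then
        arrangeGoA c1 rest (acc ++ c1 ++ [c2]) true
      else
        arrangeGoA c1 rest (acc ++ [c2]) addChar

def arrange_string (str1 : String) (char1 : String) : String :=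
  if str1 = "" then char1
  else String.ofList (arrangeGoA char1.toList str1.toList [] false)

-- ===== PORT B =====
-- first index with char1 <= str1[i] (len(str1) if none), then str1[:i] + char1 + str1[i:]
def arrange_string_alt (str1 : String) (char1 : String) : String :=
  let s := str1.toList
  let c := char1.toList
  let i := s.findIdx (fun c2 => decide (c ≤ [c2]))
  String.ofList (s.take i ++ c ++ s.drop i)

-- ===== PRECONDITION & SPEC =====
def Spec_arrange_string (str1 : String) (char1 : String) (out : String) : Prop := out = arrange_string_alt str1 char1
instance (str1 : String) (char1 : String) (out : String) : Decidable (Spec_arrange_string str1 char1 out) := by unfold Spec_arrange_string; infer_instance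

-- ===== CLAIM (what is proved, stated in full; the proofs are below) =====
def Claim_equal_arrange_string : Prop := ∀ (str1 : String) (char1 : String), Dom_arrange_string str1 char1 → Spec_arrange_string str1 char1 (arrange_string str1 char1)

-- ===== LEMMAS AND PROOFS =====

theorem arrangeGoA_true (c1 : List Char) (s acc : List Char) :
    arrangeGoA c1 s acc true = acc ++ s := by
  induction s generalizing acc with
  | nil => simp [arrangeGoA]
  | cons c2 rest ih => simp [arrangeGoA, ih]

theorem arrangeGoA_false (c1 : List Char) (s acc : List Char) :
    arrangeGoA c1 s acc false =
      acc ++ s.take (s.findIdx (fun c2 => decide (c1 ≤ [c2]))) ++ c1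
          ++ s.drop (s.findIdx (fun c2 => decide (c1 ≤ [c2]))) := by
  induction s generalizing acc with
  | nil => simp [arrangeGoA]
  | cons c2 rest ih =>
    by_cases h : c1 ≤ [c2]
    · simp [arrangeGoA, h, arrangeGoA_true, List.findIdx_cons]
    · simp [arrangeGoA, h, ih, List.findIdx_cons]

-- ===== VERDICT (by name: the statement is the Claim_ definition above) =====
theorem arrange_string_spec : Claim_equal_arrange_string := by
  intro str1 char1 _
  unfold Spec_arrange_string arrange_string arrange_string_alt
  by_cases h : str1 = ""
  · subst h; simp
  · simp [h, arrangeGoA_false]
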